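-- pv_equiv track=rewrite | github.com/eeftychiou/FuelCost | fueltools.py | get_dd_selection
-- ===== SOURCE A (Python) =====
-- def get_dd_selection(fromSelection, DepOrDes):
--     fromSelection_value = fromSelection + ['!' + x for x in fromSelection]
--     fromSelection_label = fromSelection + ['Outside ' + x for x in fromSelection]
--
--     if DepOrDes =='ADEP':
--         SDepOrDes = '(ADEP_'
--     elif DepOrDes =='ADES':
--         SDepOrDes = '(ADES_'
--     else:
--         raise ValueError('Invalid selection: ADEP or ADES')
--
--
--     SelDict = []
--     SelLength = len(fromSelection)
--
--     for idx, label in enumerate(fromSelection_label):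
--         if idx < SelLength:
--             SelDict.append({'label': fromSelection_label[idx], 'value': SDepOrDes + fromSelection_value[idx] + '=="Y")'})
--         else:
--             SelDict.append({'label': fromSelection_label[idx], 'value': SDepOrDes + fromSelection_value[idx][1:] + '=="N")'})
--
--     return SelDict
-- ===== SOURCE B (Python) =====
-- def get_dd_selection(fromSelection, DepOrDes):
--     if DepOrDes == 'ADEP':
--         SDepOrDes = '(ADEP_'
--     elif DepOrDes == 'ADES':
--         SDepOrDes = '(ADES_'
--     else:
--         raise ValueError('Invalid selection: ADEP or ADES')
--
--     inside = [{'label': x, 'value': SDepOrDes + x + '=="Y")'} for x in fromSelection]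
--     outside = [{'label': 'Outside ' + x, 'value': SDepOrDes + x + '=="N")'} for x in fromSelection]
--     return inside + outside
-- ===== Notes on version B (the rewrite author's own statement) =====
-- stated objective: simpler
-- what changed: Drops the '!'-prefixed augmented lists, the enumerate index bookkeeping, the idx<len branch and the [1:] slice; B validates DepOrDes first and builds the result as two direct passes over fromSelection (Y entries, then N entries) concatenated.
import Mathlib
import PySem

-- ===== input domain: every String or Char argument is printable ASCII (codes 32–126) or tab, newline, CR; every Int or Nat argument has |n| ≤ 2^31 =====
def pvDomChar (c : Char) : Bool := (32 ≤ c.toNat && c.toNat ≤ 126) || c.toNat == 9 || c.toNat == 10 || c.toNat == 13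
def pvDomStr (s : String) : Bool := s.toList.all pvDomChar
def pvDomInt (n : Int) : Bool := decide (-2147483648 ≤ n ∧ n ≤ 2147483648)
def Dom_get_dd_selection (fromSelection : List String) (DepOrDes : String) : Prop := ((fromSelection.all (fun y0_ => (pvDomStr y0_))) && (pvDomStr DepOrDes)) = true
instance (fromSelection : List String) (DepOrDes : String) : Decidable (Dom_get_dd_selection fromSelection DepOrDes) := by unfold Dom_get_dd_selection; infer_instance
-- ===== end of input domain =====

-- B validates DepOrDes first, then builds the result as two direct passes over fromSelection
-- (all Y entries, then all N entries), dropping A's '!'-augmented lists, enumerate index and [1:] slice.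


-- ===== PORT A =====
-- the loop of A, after SDepOrDes has been determined
def pvA_loop (fromSelection : List String) (SDepOrDes : String) : List (List (String × String)) :=
  let fromSelection_value := fromSelection ++ fromSelection.map (fun x => "!" ++ x)
  let fromSelection_label := fromSelection ++ fromSelection.map (fun x => "Outside " ++ x)
  let SelLength : Int := (fromSelection.length : Int)
  (PySem.List.enumerate fromSelection_label).foldl
    (fun SelDict p =>
      if p.1 < SelLength then
        SelDict ++ [[("label", PySem.List.pyGetD fromSelection_label p.1 ""),
                     ("value", SDepOrDes ++ PySem.List.pyGetD fromSelection_value p.1 "" ++ "==\"Y\")")]]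
      else
        SelDict ++ [[("label", PySem.List.pyGetD fromSelection_label p.1 ""),
                     ("value", SDepOrDes ++ PySem.Str.slice (PySem.List.pyGetD fromSelection_value p.1 "") (some 1) none ++ "==\"N\")")]])
    []

def get_dd_selection (fromSelection : List String) (DepOrDes : String) : List (List (String × String)) :=
  if DepOrDes = "ADEP" then pvA_loop fromSelection "(ADEP_"
  else if DepOrDes = "ADES" then pvA_loop fromSelection "(ADES_"
  else []  -- Python raises ValueError here; excluded by Pre_

-- ===== PORT B =====
def pvB_build (fromSelection : List String) (SDepOrDes : String) : List (List (String × String)) :=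
  fromSelection.map (fun x => [("label", x), ("value", SDepOrDes ++ x ++ "==\"Y\")")]) ++
  fromSelection.map (fun x => [("label", "Outside " ++ x), ("value", SDepOrDes ++ x ++ "==\"N\")")])

def get_dd_selection_alt (fromSelection : List String) (DepOrDes : String) : List (List (String × String)) :=
  if DepOrDes = "ADEP" then pvB_build fromSelection "(ADEP_"
  else if DepOrDes = "ADES" then pvB_build fromSelection "(ADES_"
  else []  -- Python raises ValueError here; excluded by Pre_

-- ===== PRECONDITION & SPEC =====
-- A raises ValueError unless DepOrDes is exactly 'ADEP' or 'ADES'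
def Pre_get_dd_selection (fromSelection : List String) (DepOrDes : String) : Prop :=
  DepOrDes = "ADEP" ∨ DepOrDes = "ADES"
instance (fromSelection : List String) (DepOrDes : String) : Decidable (Pre_get_dd_selection fromSelection DepOrDes) := by unfold Pre_get_dd_selection; infer_instance

def pvWitness_get_dd_selection : List String × String := (["AB", "CD"], "ADEP")

def Spec_get_dd_selection (fromSelection : List String) (DepOrDes : String) (out : List (List (String × String))) : Prop := out = get_dd_selection_alt fromSelection DepOrDes
instance (fromSelection : List String) (DepOrDes : String) (out : List (List (String × String))) : Decidable (Spec_get_dd_selection fromSelection DepOrDes out) := by unfold Spec_get_dd_selection; infer_instance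

-- ===== CLAIM (what is proved, stated in full; the proofs are below) =====
def Claim_equal_get_dd_selection : Prop := ∀ (fromSelection : List String) (DepOrDes : String), Dom_get_dd_selection fromSelection DepOrDes → Pre_get_dd_selection fromSelection DepOrDes → Spec_get_dd_selection fromSelection DepOrDes (get_dd_selection fromSelection DepOrDes)

-- ===== LEMMAS AND PROOFS =====

lemma pvFoldl_ite_append {α β : Type} (c : α → Prop) [DecidablePred c] (f g : α → β)
    (l : List α) (acc : List β) :
    l.foldl (fun acc x => if c x then acc ++ [f x] else acc ++ [g x]) acc
      = acc ++ l.map (fun x => if c x then f x else g x) := by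
  induction l generalizing acc with
  | nil => simp
  | cons x xs ih => rw [List.foldl_cons, ih]; by_cases h : c x <;> simp [h]

lemma pvLoop_eq_build (fs : List String) (S : String) : pvA_loop fs S = pvB_build fs S := by
  unfold pvA_loop pvB_build
  dsimp only
  rw [pvFoldl_ite_append (fun p : Int × String => p.1 < (fs.length : Int)), List.nil_append,
      PySem.List.enumerate_append, List.map_append]
  congr 1
  · apply List.ext_getElem
    · simp [PySem.List.length_enumerate]
    intro i h1 h2
    rw [List.getElem_map, List.getElem_map, PySem.List.getElem_enumerate]
    have hi : i < fs.length := by simpa [PySem.List.length_enumerate] using h1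
    have hcond : (0 + (i : Int)) < (fs.length : Int) := by omega
    simp only [hcond, if_pos]
    have hidx : (0 : Int) + (i : Int) = ((i : Nat) : Int) := by omega
    rw [hidx, PySem.List.pyGetD_natCast, PySem.List.pyGetD_natCast]
    have hl : (fs ++ fs.map (fun x => "Outside " ++ x)).getD i "" = fs[i] := by
      rw [List.getD_eq_getElem?_getD, List.getElem?_append_left hi]
      simp [hi]
    have hv : (fs ++ fs.map (fun x => "!" ++ x)).getD i "" = fs[i] := by
      rw [List.getD_eq_getElem?_getD, List.getElem?_append_left hi]
      simp [hi]
    rw [hl, hv]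
  · apply List.ext_getElem
    · simp [PySem.List.length_enumerate]
    intro i h1 h2
    rw [List.getElem_map, List.getElem_map, PySem.List.getElem_enumerate]
    have hi : i < fs.length := by simpa [PySem.List.length_enumerate] using h1
    have hcond : ¬ ((0 + (fs.length : Int) + (i : Int)) < (fs.length : Int)) := by omega
    simp only [hcond]
    have hidx : (0 : Int) + (fs.length : Int) + (i : Int) = ((fs.length + i : Nat) : Int) := by
      push_cast; ring
    rw [hidx, PySem.List.pyGetD_natCast, PySem.List.pyGetD_natCast]
    have hl : (fs ++ fs.map (fun x => "Outside " ++ x)).getD (fs.length + i) "" = "Outside " ++ fs[i] := by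
      rw [List.getD_eq_getElem?_getD, List.getElem?_append_right (by omega)]
      simp [hi]
    have hv : (fs ++ fs.map (fun x => "!" ++ x)).getD (fs.length + i) "" = "!" ++ fs[i] := by
      rw [List.getD_eq_getElem?_getD, List.getElem?_append_right (by omega)]
      simp [hi]
    rw [hl, hv]
    have hsl : PySem.Str.slice ("!" ++ fs[i]) (some 1) none = fs[i] := by
      simp [PySem.Str.slice, PySem.List.slice_from_one]
    rw [hsl]
    simp

-- ===== VERDICT (by name: the statement is the Claim_ definition above) =====
theorem get_dd_selection_spec : Claim_equal_get_dd_selection := by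
  intro fs d _ hpre
  unfold Spec_get_dd_selection get_dd_selection get_dd_selection_alt
  rcases hpre with rfl | rfl <;> simp [pvLoop_eq_build]
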